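-- pv_equiv track=rewrite | github.com/zeertag/lab2s4 | ACDC.py | encode_blocks
-- ===== SOURCE A (Python) =====
-- def dc_coding(num):
--     num = int(num)
--
--     def category(val):
--         return 0 if val == 0 else val.bit_length()
--
--     def bits(val):
--         cat = category(val)
--         if cat == 0:
--             return ""
--         if val < 0:
--             val = ((1 << cat) - 1) ^ (abs(val))
--         return bin(val)[2:].zfill(cat)
--
--     return category(num), bits(num)
--
-- def ac_coding(ac):
--     def category(val):
--         return 0 if val == 0 else val.bit_length()
--
--     def bits(val):
--         cat = category(val)
--         if cat == 0:
--             return ""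
--         if val < 0:
--             val = ((1 << cat) - 1) ^ (abs(val))
--         return bin(val)[2:].zfill(cat)
--
--     result = []
--     run_length = 0
--     for val in ac:
--         val = int(val)
--         if val == 0:
--             run_length += 1
--         else:
--             size = category(val)
--             bits_val = bits(val)
--             while run_length > 15:
--                 result.append((15, 0, ''))
--                 run_length -= 16
--             result.append((run_length, size, bits_val))
--             run_length = 0
--     if run_length > 0:
--         result.append((0, 0, ''))
--     return result
--
-- def encode_blocks(blocks):
--     result = []
--     for block in blocks:
--         dc = block[0]
--         ac = block[1:]
--         dc_encoded = dc_coding(dc)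
--         ac_encoded = ac_coding(ac)
--         result.append((dc_encoded, ac_encoded))
--     return result
-- ===== SOURCE B (Python) =====
-- def _category(val):
--     return 0 if val == 0 else val.bit_length()
--
-- def _bits(val):
--     cat = _category(val)
--     if cat == 0:
--         return ""
--     if val < 0:
--         val = ((1 << cat) - 1) ^ (abs(val))
--     return bin(val)[2:].zfill(cat)
--
-- def _ac_runs(ac):
--     """First pass: (zero-run before each nonzero, the nonzero value) pairs,
--     plus whether any zeros trail after the last nonzero."""
--     pairs = []
--     run = 0
--     for v in ac:
--         v = int(v)
--         if v == 0:
--             run += 1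
--         else:
--             pairs.append((run, v))
--             run = 0
--     return pairs, run > 0
--
-- def _ac_tokens(pairs, trailing):
--     """Second pass: expand runs > 15 into ZRL tokens, one EOB iff zeros trail."""
--     out = [t
--            for run, v in pairs
--            for t in [(15, 0, '')] * (run // 16) + [(run % 16, _category(v), _bits(v))]]
--     if trailing:
--         out.append((0, 0, ''))
--     return out
--
-- def encode_blocks(blocks):
--     result = []
--     for block in blocks:
--         dc = int(block[0])
--         pairs, trailing = _ac_runs(block[1:])
--         result.append(((_category(dc), _bits(dc)), _ac_tokens(pairs, trailing)))
--     return result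
-- ===== Notes on version B (the rewrite author's own statement) =====
-- stated objective: alternative
-- what changed: AC coding is split into two passes: a run-length pass collecting (zero-run, value) pairs plus a trailing-zeros flag, then an expansion pass computing the ZRL count and remainder arithmetically (run//16, run%16) instead of A's in-loop while that decrements the run by 16, with the EOB appended from the flag.
-- outside the precondition, e.g. on encode_blocks([[]]): A raises IndexError, B raises IndexError
import Mathlib
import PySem

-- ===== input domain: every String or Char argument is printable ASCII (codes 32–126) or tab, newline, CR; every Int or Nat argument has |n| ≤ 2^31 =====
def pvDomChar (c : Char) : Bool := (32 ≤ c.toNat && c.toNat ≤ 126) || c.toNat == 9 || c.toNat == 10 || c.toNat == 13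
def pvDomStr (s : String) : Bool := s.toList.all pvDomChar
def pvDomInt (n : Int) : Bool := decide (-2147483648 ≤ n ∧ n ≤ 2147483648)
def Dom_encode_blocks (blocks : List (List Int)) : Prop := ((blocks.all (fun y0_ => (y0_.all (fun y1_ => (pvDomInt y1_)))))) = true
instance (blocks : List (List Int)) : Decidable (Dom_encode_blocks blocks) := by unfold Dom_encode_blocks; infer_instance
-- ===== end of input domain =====

-- B replaces A's single AC loop (with its in-loop run>15 while) by a two-pass
-- decomposition: a run-length pass producing (zero-run, value) pairs plus a
-- trailing-zeros flag, then an expansion pass emitting ZRL/EOB tokens; objective: alternative.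

-- shared category/bits helpers (identical nested helper code in both Pythons)
def pyCategory (val : Int) : Int :=
  if val = 0 then 0 else (PySem.Int.bitLength val : Int)

-- bin(v)[2:] for v ≥ 0 is PySem.Int.toBin v (format(v,'b')); .zfill is PySem.Str.zfill
def pyBits (val : Int) : String :=
  let cat := pyCategory val
  if cat = 0 then ""
  else
    let v : Int := if val < 0 then PySem.Int.bxor ((1 <<< cat.toNat) - 1) (val.natAbs : Int) else val
    PySem.Str.zfill (PySem.Int.toBin v) cat

-- ===== PORT A =====
def dc_coding (num : Int) : Int × String := (pyCategory num, pyBits num)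

-- the 'while run_length > 15: append ZRL; run_length -= 16' loop
def zrlLoop (result : List (Int × Int × String)) (run : Int) : List (Int × Int × String) × Int :=
  if 15 < run then zrlLoop (result ++ [(15, 0, "")]) (run - 16) else (result, run)
termination_by run.toNat
decreasing_by omega

def acStepA (st : List (Int × Int × String) × Int) (val : Int) : List (Int × Int × String) × Int :=
  if val = 0 then (st.1, st.2 + 1)
  else
    let size := pyCategory val
    let bitsVal := pyBits val
    let rr := zrlLoop st.1 st.2
    (rr.1 ++ [(rr.2, size, bitsVal)], 0)

def ac_coding (ac : List Int) : List (Int × Int × String) :=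
  let st := ac.foldl acStepA ([], 0)
  if 0 < st.2 then st.1 ++ [(0, 0, "")] else st.1

def encode_blocks (blocks : List (List Int)) : List ((Int × String) × (List (Int × Int × String))) :=
  blocks.foldl (fun result block =>
    match PySem.List.pyGet? block 0 with
    | none => result   -- block[0] on an empty block: Python raises IndexError (excluded by Pre_)
    | some dc => result ++ [(dc_coding dc, ac_coding (PySem.List.slice block (some 1) none))]) []

-- ===== PORT B =====
def acRunsStep (st : List (Int × Int) × Int) (v : Int) : List (Int × Int) × Int :=
  if v = 0 then (st.1, st.2 + 1) else (st.1 ++ [(st.2, v)], 0)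

def ac_runs (ac : List Int) : List (Int × Int) × Bool :=
  let st := ac.foldl acRunsStep ([], 0)
  (st.1, decide (0 < st.2))

def acToken (p : Int × Int) : List (Int × Int × String) :=
  List.replicate (PySem.Int.floordiv p.1 16).toNat (15, 0, "")
    ++ [(PySem.Int.mod p.1 16, pyCategory p.2, pyBits p.2)]

def ac_tokens (pairs : List (Int × Int)) (trailing : Bool) : List (Int × Int × String) :=
  let out := pairs.flatMap acToken
  if trailing then out ++ [(0, 0, "")] else out

def encode_blocks_alt (blocks : List (List Int)) : List ((Int × String) × (List (Int × Int × String))) :=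
  blocks.foldl (fun result block =>
    match PySem.List.pyGet? block 0 with
    | none => result   -- block[0] on an empty block: Python raises IndexError (excluded by Pre_)
    | some dc =>
      let rt := ac_runs (PySem.List.slice block (some 1) none)
      result ++ [((pyCategory dc, pyBits dc), ac_tokens rt.1 rt.2)]) []

-- ===== PRECONDITION & SPEC =====
-- Pre_ excludes blocks containing an empty block, on which both Pythons raise IndexError at block[0].
def Pre_encode_blocks (blocks : List (List Int)) : Prop := ∀ block ∈ blocks, block ≠ []
instance (blocks : List (List Int)) : Decidable (Pre_encode_blocks blocks) := by unfold Pre_encode_blocks; infer_instance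

def pvWitness_encode_blocks : List (List Int) := [[5, 0, 0, 3, 0], [-7, 1]]

def Spec_encode_blocks (blocks : List (List Int)) (out : List ((Int × String) × (List (Int × Int × String)))) : Prop := out = encode_blocks_alt blocks
instance (blocks : List (List Int)) (out : List ((Int × String) × (List (Int × Int × String)))) : Decidable (Spec_encode_blocks blocks out) := by unfold Spec_encode_blocks; infer_instance

-- ===== CLAIM (what is proved, stated in full; the proofs are below) =====
def Claim_equal_encode_blocks : Prop := ∀ (blocks : List (List Int)), Dom_encode_blocks blocks → Pre_encode_blocks blocks → Spec_encode_blocks blocks (encode_blocks blocks)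

-- ===== LEMMAS AND PROOFS =====

-- A's ZRL while-loop, on a nonnegative run, emits ⌊r/16⌋ ZRL markers and leaves r % 16.
lemma zrl_char (r : Nat) (res : List (Int × Int × String)) :
    zrlLoop res (r : Int) = (res ++ List.replicate (r / 16) (15, 0, ""), ((r % 16 : Nat) : Int)) := by
  induction r using Nat.strong_induction_on generalizing res with
  | _ r ih =>
    rw [zrlLoop]
    by_cases h : 15 < (r : Int)
    · have h16 : 16 ≤ r := by exact_mod_cast h
      have hc : ((r : Int) - 16) = ((r - 16 : Nat) : Int) := by omega
      rw [if_pos h, hc, ih (r - 16) (by omega)]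
      have hdiv : r / 16 = (r - 16) / 16 + 1 := by omega
      have hmod : (r - 16) % 16 = r % 16 := by omega
      rw [hdiv, hmod, List.replicate_succ]
      simp
    · have hr : r < 16 := by omega
      rw [if_neg h]
      have h0 : r / 16 = 0 := by omega
      have h1 : r % 16 = r := by omega
      simp [h0, h1]

-- invariant relating A's fold state to B's first-pass state
lemma fold_rel (ac : List Int) : ∀ (ps : List (Int × Int)) (r : Nat),
    ∃ (ps' : List (Int × Int)) (r' : Nat),
      ac.foldl acRunsStep (ps, (r : Int)) = (ps', (r' : Int)) ∧
      ac.foldl acStepA (ps.flatMap acToken, (r : Int)) = (ps'.flatMap acToken, (r' : Int)) := by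
  induction ac with
  | nil => exact fun ps r => ⟨ps, r, rfl, rfl⟩
  | cons v ac ih =>
    intro ps r
    simp only [List.foldl_cons]
    by_cases hv : v = 0
    · subst hv
      have hA1 : acStepA (ps.flatMap acToken, (r : Int)) 0 = (ps.flatMap acToken, ((r + 1 : Nat) : Int)) := by
        simp [acStepA]
      have hB1 : acRunsStep (ps, (r : Int)) 0 = (ps, ((r + 1 : Nat) : Int)) := by
        simp [acRunsStep]
      rw [hA1, hB1]
      exact ih ps (r + 1)
    · have hstepA : acStepA (ps.flatMap acToken, (r : Int)) v
          = ((ps ++ [((r : Int), v)]).flatMap acToken, ((0 : Nat) : Int)) := by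
        simp [acStepA, hv, zrl_char, acToken, List.flatMap_append]
        omega
      have hstepB : acRunsStep (ps, (r : Int)) v = (ps ++ [((r : Int), v)], ((0 : Nat) : Int)) := by
        simp [acRunsStep, hv]
      rw [hstepA, hstepB]
      exact ih (ps ++ [((r : Int), v)]) 0

lemma ac_eq (ac : List Int) : ac_coding ac = ac_tokens (ac_runs ac).1 (ac_runs ac).2 := by
  obtain ⟨ps', r', hB, hA⟩ := fold_rel ac [] 0
  unfold ac_coding ac_runs ac_tokens
  have h0 : ((0 : Nat) : Int) = (0 : Int) := rfl
  rw [h0] at hB hA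
  have hA' : ac.foldl acStepA ([], 0) = (ps'.flatMap acToken, (r' : Int)) := by
    simpa using hA
  rw [hA', hB]
  by_cases hr : 0 < r'
  · simp [hr]
  · simp [hr]

-- ===== VERDICT (by name: the statement is the Claim_ definition above) =====
theorem encode_blocks_spec : Claim_equal_encode_blocks := by
  intro blocks _ _
  unfold Spec_encode_blocks encode_blocks encode_blocks_alt
  have hstep : (fun (result : List ((Int × String) × (List (Int × Int × String)))) (block : List Int) =>
      match PySem.List.pyGet? block 0 with
      | none => result
      | some dc => result ++ [(dc_coding dc, ac_coding (PySem.List.slice block (some 1) none))])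
      = (fun result block =>
      match PySem.List.pyGet? block 0 with
      | none => result
      | some dc =>
        let rt := ac_runs (PySem.List.slice block (some 1) none)
        result ++ [((pyCategory dc, pyBits dc), ac_tokens rt.1 rt.2)]) := by
    funext result block
    cases PySem.List.pyGet? block 0 with
    | none => rfl
    | some dc => simp [dc_coding, ac_eq]
  rw [hstep]
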